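-- pv_equiv track=rewrite | github.com/junohkwon/Python | ch10_LoopingMatrix_Practice_Sophistication.py | f14
-- ===== SOURCE A (Python) =====
-- def f14(rows, cols):
--     matrix=[]
--
--     for r in range(0,rows):
--         row=[]
--         for c in range(0,cols):
--             cal=0
--             if r-1 >= 0:
--                 cal+=1
--             if r+1 < rows:
--                 cal += 1
--             if c-1 >= 0:
--                 cal += 1
--             if c+1 < cols:
--                 cal += 1
--             row.append(cal)
--         matrix.append(row)
--
--     return matrix
-- ===== SOURCE B (Python) =====
-- def f14(rows, cols):
--     def weights(n):
--         return [(1 if i > 0 else 0) + (1 if i < n - 1 else 0) for i in range(n)]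
--     row_w = weights(rows)
--     if not row_w:
--         return []
--     col_w = weights(cols)
--     return [[rw + cw for cw in col_w] for rw in row_w]
-- ===== Notes on version B (the rewrite author's own statement) =====
-- stated objective: faster
-- what changed: B precomputes one 1-D neighbor-weight table per axis (weights(n)) and fills each cell as row weight + column weight, removing the four per-cell boundary tests and accumulator; B also returns [] immediately when there are no rows.
import Mathlib
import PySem

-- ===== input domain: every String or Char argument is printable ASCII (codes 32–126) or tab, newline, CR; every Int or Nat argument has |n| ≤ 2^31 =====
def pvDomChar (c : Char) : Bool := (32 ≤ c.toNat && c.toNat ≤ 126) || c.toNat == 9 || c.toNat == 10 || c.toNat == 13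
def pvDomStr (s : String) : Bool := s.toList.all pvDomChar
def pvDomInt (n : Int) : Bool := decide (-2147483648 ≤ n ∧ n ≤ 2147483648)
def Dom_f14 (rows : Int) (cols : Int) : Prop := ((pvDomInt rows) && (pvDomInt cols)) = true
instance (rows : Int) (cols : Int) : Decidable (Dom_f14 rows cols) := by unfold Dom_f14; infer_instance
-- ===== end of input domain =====

-- B replaces the four per-cell boundary tests with two precomputed 1-D weight tables combined per cell (objective: simpler).

-- ===== PORT A =====
def f14 (rows : Int) (cols : Int) : List (List Int) :=
  (PySem.List.pyRange 0 rows 1).foldl (fun matrix r =>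
    matrix ++ [(PySem.List.pyRange 0 cols 1).foldl (fun row c =>
      let cal : Int := 0
      let cal := if r - 1 ≥ 0 then cal + 1 else cal
      let cal := if r + 1 < rows then cal + 1 else cal
      let cal := if c - 1 ≥ 0 then cal + 1 else cal
      let cal := if c + 1 < cols then cal + 1 else cal
      row ++ [cal]) []]) []

-- ===== PORT B =====
def f14Weights (n : Int) : List Int :=
  (PySem.List.pyRange 0 n 1).map (fun i =>
    (if i > 0 then (1 : Int) else 0) + (if i < n - 1 then 1 else 0))

def f14_alt (rows : Int) (cols : Int) : List (List Int) :=
  let row_w := f14Weights rows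
  if row_w = [] then []
  else row_w.map (fun rw => (f14Weights cols).map (fun cw => rw + cw))

-- ===== PRECONDITION & SPEC =====
def Spec_f14 (rows : Int) (cols : Int) (out : List (List Int)) : Prop := out = f14_alt rows cols
instance (rows : Int) (cols : Int) (out : List (List Int)) : Decidable (Spec_f14 rows cols out) := by unfold Spec_f14; infer_instance

-- ===== CLAIM (what is proved, stated in full; the proofs are below) =====
def Claim_equal_f14 : Prop := ∀ (rows : Int) (cols : Int), Dom_f14 rows cols → Spec_f14 rows cols (f14 rows cols)

-- ===== LEMMAS AND PROOFS =====
theorem f14_alt_eq_map (rows cols : Int) :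
    f14_alt rows cols = (f14Weights rows).map (fun rw => (f14Weights cols).map (fun cw => rw + cw)) := by
  unfold f14_alt
  by_cases h : f14Weights rows = [] <;> simp [h]

theorem f14_eq_alt (rows cols : Int) : f14 rows cols = f14_alt rows cols := by
  rw [f14_alt_eq_map]
  unfold f14 f14Weights
  rw [PySem.List.foldl_append_singleton_eq_map, List.nil_append, List.map_map]
  apply List.map_congr_left
  intro r hr
  rw [PySem.List.foldl_append_singleton_eq_map, List.nil_append]
  simp only [Function.comp_apply, List.map_map]
  apply List.map_congr_left
  intro c hc
  simp only [Function.comp_apply]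
  split_ifs <;> omega

-- ===== VERDICT (by name: the statement is the Claim_ definition above) =====
theorem f14_spec : Claim_equal_f14 := by
  intro rows cols _
  exact f14_eq_alt rows cols
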